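-- pv_equiv track=rewrite | github.com/TheMiles/aoc | 09-1.py | parse
-- ===== SOURCE A (Python) =====
-- def read_marker(l,i):
--     data   = []
--     select = 0
--     while l[i] != ')':
--         c = l[i]
--         if c == '(':
--             data.append('')
--         elif c == 'x':
--             data.append('')
--             select += 1
--         else:
--             data[select] += c
--         i += 1
--     return i+1, [int(x) for x in data]
--
-- def parse(l):
--     out = ''
--     i = 0
--     while i < len(l):
--         if l[i] == '(':
--             i, [length,repitions] = read_marker(l,i)
--             out += l[i:i+length] * repitions
--             i   += length
--         else:
--             out += l[i]
--             i+=1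
--     return out
-- ===== SOURCE B (Python) =====
-- def parse(l):
--     out = []
--     i = 0
--     n = len(l)
--     while i < n:
--         j = l.find('(', i)
--         if j == -1:
--             out.append(l[i:])
--             break
--         out.append(l[i:j])
--         close = l.index(')', j)
--         length, reps = map(int, l[j+1:close].split('x'))
--         out.append(l[close + 1:close + 1 + length] * reps)
--         i = close + 1 + length
--     return ''.join(out)
-- ===== Notes on version B (the rewrite author's own statement) =====
-- stated objective: faster
-- what changed: B replaces A's character-by-character scan with its stateful read_marker helper (and its quadratic out += accumulation) by find/index jumps to the marker delimiters, slicing the marker body and splitting it at its separator, and collecting whole chunks in a list joined once at the end.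
-- outside the precondition, e.g. on parse('( 3x2)ab'): A returns 'abab', B returns 'abab'; on parse('(-3x2)ab'): A returns 'x2)ab', B returns 'x2)ab'; on parse('('): A raises IndexError, B raises ValueError
import Mathlib
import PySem

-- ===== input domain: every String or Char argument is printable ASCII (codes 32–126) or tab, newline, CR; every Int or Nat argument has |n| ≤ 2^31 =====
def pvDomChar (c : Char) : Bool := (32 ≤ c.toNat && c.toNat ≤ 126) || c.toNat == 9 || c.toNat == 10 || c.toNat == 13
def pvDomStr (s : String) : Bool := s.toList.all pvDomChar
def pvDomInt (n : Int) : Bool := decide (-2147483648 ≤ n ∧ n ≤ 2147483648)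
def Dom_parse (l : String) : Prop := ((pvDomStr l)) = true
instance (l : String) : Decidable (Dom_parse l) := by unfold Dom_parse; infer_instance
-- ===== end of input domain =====

-- B replaces A's char-by-char scan + read_marker helper (with its quadratic string
-- accumulation) by find/index jumps to the marker delimiters, slice-based marker parsing and
-- a chunk list joined once at the end (objective: faster, measured).

-- Python's  s * n  on strings (empty for n ≤ 0); exact, shared by both ports.
def pyStrMul (s : List Char) (n : Int) : List Char := (List.replicate n.toNat s).flatten

-- ===== PORT A =====
-- read_marker's while loop; fuel only makes the recursion total (Python raises IndexError = none).
def readMarkerAux (cs : List Char) (fuel : Nat) (i : Int) (data : List (List Char)) (select : Nat) :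
    Option (Int × List (List Char)) :=
  match fuel with
  | 0 => none
  | fuel + 1 =>
    match PySem.List.pyGet? cs i with          -- l[i]  (none = IndexError)
    | none => none
    | some c =>
      if c = ')' then some (i + 1, data)
      else if c = '(' then readMarkerAux cs fuel (i + 1) (data ++ [[]]) select
      else if c = 'x' then readMarkerAux cs fuel (i + 1) (data ++ [[]]) (select + 1)
      else if h : select < data.length then    -- data[select] += c (IndexError if out of range)
        readMarkerAux cs fuel (i + 1) (data.set select (data[select] ++ [c])) select
      else none

-- the while-loop of parse; fuel only makes the recursion total (none = a Python exception
-- or a run the fuel cannot cover, both excluded by Pre_parse).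
def parseLoopA (cs : List Char) (fuel : Nat) (i : Int) (out : List Char) : Option (List Char) :=
  match fuel with
  | 0 => none
  | fuel + 1 =>
    if i < (cs.length : Int) then
      match PySem.List.pyGet? cs i with
      | none => none
      | some c =>
        if c = '(' then
          match readMarkerAux cs (cs.length + 1) i [] 0 with
          | none => none
          | some (i', data) =>
            match data.mapM PySem.Int.ofChars? with   -- [int(x) for x in data]
            | some [length, reps] =>
              parseLoopA cs fuel (i' + length)
                (out ++ pyStrMul (PySem.List.slice cs (some i') (some (i' + length))) reps)
            | _ => none                               -- ValueError (int() or unpacking)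
        else parseLoopA cs fuel (i + 1) (out ++ [c])
    else some out

def parse (l : String) : String :=
  match parseLoopA l.toList (l.toList.length + 1) 0 [] with
  | some out => String.ofList out
  | none => ""          -- Python raises / diverges here; excluded by Pre_parse

-- ===== PORT B =====
-- Source B's loop: jump to the next '(' with find, locate ')' with index, slice and split the
-- marker body, append whole chunks, join at the end.
def parseLoopB (cs : List Char) (fuel : Nat) (i : Int) (acc : List (List Char)) :
    Option (List (List Char)) :=
  match fuel with
  | 0 => none
  | fuel + 1 =>
    if i < (cs.length : Int) then
      let j := PySem.Chars.findFrom cs ['('] i none        -- l.find('(', i)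
      if j = -1 then some (acc ++ [PySem.List.slice cs (some i) none])   -- out.append(l[i:]); break
      else
        let acc := acc ++ [PySem.List.slice cs (some i) (some j)]        -- out.append(l[i:j])
        let close := PySem.Chars.findFrom cs [')'] j none  -- l.index(')', j)
        if close = -1 then none                            -- ValueError
        else
          match (PySem.Chars.splitOn (PySem.List.slice cs (some (j + 1)) (some close)) ['x']).mapM
              PySem.Int.ofChars? with                       -- map(int, body.split('x'))
          | some [length, reps] =>
            parseLoopB cs fuel (close + 1 + length)
              (acc ++ [pyStrMul (PySem.List.slice cs (some (close + 1)) (some (close + 1 + length))) reps])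
          | _ => none                                      -- ValueError
    else some acc

def parse_alt (l : String) : String :=
  match parseLoopB l.toList (l.toList.length + 1) 0 [] with
  | some parts => String.ofList (PySem.Chars.join [] parts)    -- ''.join(out)
  | none => ""

-- ===== PRECONDITION & SPEC =====
-- Pre_parse: every marker the scan reaches is an opening paren, digits, the separator letter,
-- digits, a closing paren.  Anything else either makes A raise (unterminated marker → IndexError;
-- a field int() rejects, a nested opening paren or an extra separator → ValueError), or — when
-- int() still parses, e.g. a space, a plus sign or a negative length — moves A's index
-- non-monotonically (a negative length steps i backwards and can even make A loop forever),
-- outside the left-to-right regime this claim is about.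
def pvGoodF : Nat → List Char → Bool
  | _, [] => true
  | 0, _ :: _ => false
  | fuel + 1, c :: rest =>
    if c = '(' then
      match rest.dropWhile Char.isDigit with
      | 'x' :: r2 =>
        match r2.dropWhile Char.isDigit with
        | ')' :: tail =>
          let ds1 := rest.takeWhile Char.isDigit
          let ds2 := r2.takeWhile Char.isDigit
          match PySem.Int.ofChars? ds1, PySem.Int.ofChars? ds2 with
          | some v1, some v2 =>
            !ds1.isEmpty && !ds2.isEmpty && decide (0 ≤ v1) && decide (0 ≤ v2) &&
              pvGoodF fuel (tail.drop v1.toNat)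
          | _, _ => false
        | _ => false
      | _ => false
    else pvGoodF fuel rest

def Pre_parse (l : String) : Prop := pvGoodF (l.toList.length + 1) l.toList = true
instance (l : String) : Decidable (Pre_parse l) := by unfold Pre_parse; infer_instance
def pvWitness_parse : String := "(3x2)abX"

def Spec_parse (l : String) (out : String) : Prop := out = parse_alt l
instance (l : String) (out : String) : Decidable (Spec_parse l out) := by unfold Spec_parse; infer_instance

-- ===== CLAIM (what is proved, stated in full; the proofs are below) =====
def Claim_equal_parse : Prop := ∀ (l : String), Dom_parse l → Pre_parse l → Spec_parse l (parse l)

-- ===== LEMMAS AND PROOFS =====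

-- pvGoodF with enough fuel is the well-founded scan pvGood (proof-side form)
def pvGood : List Char → Bool
  | [] => true
  | c :: rest =>
    if c = '(' then
      match h1 : rest.dropWhile Char.isDigit with
      | 'x' :: r2 =>
        match h2 : r2.dropWhile Char.isDigit with
        | ')' :: tail =>
          let ds1 := rest.takeWhile Char.isDigit
          let ds2 := r2.takeWhile Char.isDigit
          match PySem.Int.ofChars? ds1, PySem.Int.ofChars? ds2 with
          | some v1, some v2 =>
            !ds1.isEmpty && !ds2.isEmpty && decide (0 ≤ v1) && decide (0 ≤ v2) &&
              pvGood (tail.drop v1.toNat)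
          | _, _ => false
        | _ => false
      | _ => false
    else pvGood rest
termination_by cs => cs.length
decreasing_by
  · have g1 := List.length_dropWhile_le (p := Char.isDigit) (l := rest)
    have g2 := List.length_dropWhile_le (p := Char.isDigit) (l := r2)
    rw [h1] at g1; rw [h2] at g2
    simp at g1 g2 ⊢
    have : (List.drop v1.toNat tail).length ≤ tail.length := by simp
    omega
  · simp


lemma pvGoodF_eq : ∀ (fuel : Nat) (cs : List Char), cs.length < fuel → pvGoodF fuel cs = pvGood cs := by
  intro fuel
  induction fuel with
  | zero => intro cs h; omega
  | succ fuel ih =>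
    intro cs h
    cases cs with
    | nil =>
      rw [pvGoodF, pvGood]
    | cons c rest =>
      rw [pvGoodF, pvGood]
      by_cases hc : c = '('
      · simp only [if_pos hc]
        symm
        split
        · rename_i r2 heq1
          split
          · rename_i tail heq2
            split
            · rename_i v1 v2 hv1 hv2
              symm
              simp only [heq1, heq2, hv1, hv2]
              have hlen1 := List.length_dropWhile_le (p := Char.isDigit) (l := rest)
              have hlen2 := List.length_dropWhile_le (p := Char.isDigit) (l := r2)
              rw [heq1] at hlen1
              rw [heq2] at hlen2
              have hdl : (tail.drop v1.toNat).length ≤ tail.length := by simp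
              rw [ih (tail.drop v1.toNat) (by simp at h hlen1 hlen2 ⊢; omega)]
            · rename_i hbad
              symm
              simp only [heq1, heq2]
          · rename_i hbad
            symm
            simp only [heq1]
        · rename_i hbad
          symm
          split
          · rename_i r2 heq1
            exact (hbad r2 heq1).elim
          · rfl
      · simp only [if_neg hc]
        exact ih rest (by simp at h; omega)

-- the decompressed text of a pvGood-shaped suffix (proof-side reference function)
def decomp : List Char → List Char
  | [] => []
  | c :: rest =>
    if c = '(' then
      match h1 : rest.dropWhile Char.isDigit with
      | 'x' :: r2 =>
        match h2 : r2.dropWhile Char.isDigit with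
        | ')' :: tail =>
          let ds1 := rest.takeWhile Char.isDigit
          match PySem.Int.ofChars? ds1, PySem.Int.ofChars? (r2.takeWhile Char.isDigit) with
          | some v1, some v2 =>
            pyStrMul (tail.take v1.toNat) v2 ++ decomp (tail.drop v1.toNat)
          | _, _ => []
        | _ => []
      | _ => []
    else c :: decomp rest
termination_by cs => cs.length
decreasing_by
  · have g1 := List.length_dropWhile_le (p := Char.isDigit) (l := rest)
    have g2 := List.length_dropWhile_le (p := Char.isDigit) (l := r2)
    rw [h1] at g1; rw [h2] at g2
    simp at g1 g2 ⊢
    have : (List.drop v1.toNat tail).length ≤ tail.length := by simp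
    omega
  · simp

lemma digit_ne {c : Char} (h : c.isDigit = true) : c ≠ '(' ∧ c ≠ ')' ∧ c ≠ 'x' := by
  refine ⟨?_, ?_, ?_⟩ <;> rintro rfl <;> simp [Char.isDigit] at h

lemma drop_succ_of {cs t : List Char} {n : Nat} {a : Char} (h : cs.drop n = a :: t) :
    cs.drop (n + 1) = t := by
  have : cs.drop (n + 1) = (cs.drop n).drop 1 := by rw [List.drop_drop]
  rw [this, h]; rfl

lemma drop_add_of {cs : List Char} {s t : List Char} {n : Nat} (h : cs.drop n = s ++ t) :
    cs.drop (n + s.length) = t := by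
  have : cs.drop (n + s.length) = (cs.drop n).drop s.length := by rw [List.drop_drop]
  rw [this, h, List.drop_left]

lemma getElem?_of_drop {cs t : List Char} {n : Nat} {a : Char} (h : cs.drop n = a :: t) :
    cs[n]? = some a := by
  have : (cs.drop n)[0]? = cs[n + 0]? := List.getElem?_drop
  simpa [h] using this.symm

-- takeWhile/dropWhile on  ds ++ x :: R  with ds all-p and x not-p
lemma takeWhile_shape {p : Char → Bool} {ds R : List Char} {x : Char}
    (hds : ∀ c ∈ ds, p c = true) (hx : p x = false) :
    (ds ++ x :: R).takeWhile p = ds ∧ (ds ++ x :: R).dropWhile p = x :: R := by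
  induction ds with
  | nil => simp [List.dropWhile, hx]
  | cons d ds ih =>
    have hd : p d = true := hds d (by simp)
    have := ih (fun c hc => hds c (by simp [hc]))
    simp [List.takeWhile, List.dropWhile, hd, this]

-- inversion of pvGood at a '('
lemma pvGood_paren {rest : List Char} (h : pvGood ('(' :: rest) = true) :
    ∃ ds1 ds2 tail v1 v2,
      rest = ds1 ++ 'x' :: ds2 ++ ')' :: tail ∧
      (∀ c ∈ ds1, c.isDigit = true) ∧ (∀ c ∈ ds2, c.isDigit = true) ∧
      PySem.Int.ofChars? ds1 = some v1 ∧ PySem.Int.ofChars? ds2 = some v2 ∧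
      0 ≤ v1 ∧ 0 ≤ v2 ∧ pvGood (tail.drop v1.toNat) = true := by
  rw [pvGood] at h
  simp only [reduceIte] at h
  split at h
  · rename_i r2 heq1
    split at h
    · rename_i tail heq2
      split at h
      · rename_i v1 v2 hv1 hv2
        simp only [Bool.and_eq_true, Bool.not_eq_true', decide_eq_true_eq] at h
        obtain ⟨⟨⟨⟨he1, he2⟩, hn1⟩, hn2⟩, hrec⟩ := h
        refine ⟨rest.takeWhile Char.isDigit, r2.takeWhile Char.isDigit, tail, v1, v2, ?_,
          fun c hc => List.mem_takeWhile_imp hc, fun c hc => List.mem_takeWhile_imp hc,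
          hv1, hv2, hn1, hn2, hrec⟩
        have e1 : rest.takeWhile Char.isDigit ++ 'x' :: r2 = rest := by
          rw [← heq1]; exact List.takeWhile_append_dropWhile
        have e2 : r2.takeWhile Char.isDigit ++ ')' :: tail = r2 := by
          rw [← heq2]; exact List.takeWhile_append_dropWhile
        generalize hA : List.takeWhile Char.isDigit rest = A at e1 ⊢
        generalize hB : List.takeWhile Char.isDigit r2 = B at e2 ⊢
        rw [← e1, ← e2]
        simp
      · simp at h
    · simp at h
  · simp at h

lemma decomp_paren {ds1 ds2 tail : List Char} {v1 v2 : Int}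
    (h1 : ∀ c ∈ ds1, c.isDigit = true) (h2 : ∀ c ∈ ds2, c.isDigit = true)
    (hv1 : PySem.Int.ofChars? ds1 = some v1) (hv2 : PySem.Int.ofChars? ds2 = some v2) :
    decomp ('(' :: (ds1 ++ 'x' :: ds2 ++ ')' :: tail)) =
      pyStrMul (tail.take v1.toNat) v2 ++ decomp (tail.drop v1.toNat) := by
  have hx : Char.isDigit 'x' = false := by decide
  have hp : Char.isDigit ')' = false := by decide
  have e1 := takeWhile_shape (R := ds2 ++ ')' :: tail) h1 hx
  have e2 := takeWhile_shape (R := tail) h2 hp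
  rw [show ds1 ++ 'x' :: ds2 ++ ')' :: tail = ds1 ++ 'x' :: (ds2 ++ ')' :: tail) by simp]
  rw [decomp]
  simp only [reduceIte]
  split
  · rename_i r2 heq1
    rw [e1.2] at heq1
    injection heq1 with _ hr2
    subst hr2
    split
    · rename_i tl heq2
      rw [e2.2] at heq2
      injection heq2 with _ htl
      subst htl
      split
      · rename_i w1 w2 hw1 hw2
        rw [e1.1, hv1] at hw1
        rw [e2.1, hv2] at hw2
        injection hw1 with hw1; injection hw2 with hw2
        rw [← hw1, ← hw2]
      · rename_i hbad
        exact absurd (hbad v1 v2 (by rw [e1.1]; exact hv1) (by rw [e2.1]; exact hv2)) (by simp)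
    · rename_i hbad
      exact absurd (hbad tail e2.2) (by simp)
  · rename_i hbad
    exact absurd (hbad (ds2 ++ ')' :: tail) e1.2) (by simp)

-- non-'(' characters pass through pvGood and decomp unchanged
lemma noparen_append {s : List Char} (hs : '(' ∉ s) (t : List Char) :
    pvGood (s ++ t) = pvGood t ∧ decomp (s ++ t) = s ++ decomp t := by
  induction s with
  | nil => simp
  | cons c s ih =>
    have hc : ¬(c = '(') := by rintro rfl; exact hs (by simp)
    have hs' : '(' ∉ s := fun h => hs (by simp [h])
    obtain ⟨ihg, ihd⟩ := ih hs'
    constructor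
    · rw [List.cons_append, pvGood]
      simp only [if_neg hc]
      exact ihg
    · rw [List.cons_append, decomp]
      simp only [if_neg hc]
      rw [ihd]
      simp

lemma decomp_noparen {s : List Char} (hs : '(' ∉ s) : decomp s = s := by
  have h := (noparen_append hs []).2
  have h0 : decomp ([] : List Char) = [] := by rw [decomp]
  rw [h0] at h
  simpa using h

-- ===== A-side loop characterisation =====

lemma rmScan (cs : List Char) {ds : List Char} (hds : ∀ c ∈ ds, c.isDigit = true) :
    ∀ (fuel n : Nat) (rest : List Char) (pre : List (List Char)) (cur : List Char),
      cs.drop n = ds ++ rest →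
      readMarkerAux cs (fuel + ds.length) (↑n) (pre ++ [cur]) pre.length
        = readMarkerAux cs fuel (↑(n + ds.length)) (pre ++ [cur ++ ds]) pre.length := by
  revert hds
  induction ds with
  | nil => intro _ fuel n rest pre cur _; simp
  | cons d ds ih =>
    intro hds fuel n rest pre cur hdrop
    have hd : d.isDigit = true := hds d (by simp)
    obtain ⟨hd1, hd2, hd3⟩ := digit_ne hd
    have hget : cs[n]? = some d := getElem?_of_drop (t := ds ++ rest) (by simpa using hdrop)
    rw [show fuel + (d :: ds).length = (fuel + ds.length) + 1 from by simp [List.length_cons]; omega]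
    rw [readMarkerAux]
    rw [PySem.List.pyGet?_natCast, hget]
    simp only [if_neg hd2, if_neg hd1, if_neg hd3]
    rw [dif_pos (show pre.length < (pre ++ [cur]).length by simp only [List.length_append, List.length_cons, List.length_nil]; omega)]
    have hset : (pre ++ [cur]).set pre.length ((pre ++ [cur])[pre.length]'(by simp) ++ [d])
        = pre ++ [cur ++ [d]] := by
      rw [List.getElem_concat_length rfl]
      rw [List.set_append_right _ _ (Nat.le_refl _)]
      simp
    rw [hset]
    have hcast : (↑n : Int) + 1 = ↑(n + 1) := by push_cast; ring
    rw [hcast]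
    have := ih (fun c hc => hds c (by simp [hc])) fuel (n + 1) rest pre (cur ++ [d])
      (by
        have : cs.drop (n + 1) = ds ++ rest := by
          have h1 : cs.drop (n+1) = (cs.drop n).drop 1 := by rw [List.drop_drop]
          rw [h1, hdrop]; rfl
        exact this)
    rw [this]
    simp only [List.append_assoc, List.singleton_append]
    rw [show n + 1 + ds.length = n + (ds.length + 1) from by omega]
    rfl

lemma rmMarker (cs : List Char) {n : Nat} {ds1 ds2 tail : List Char}
    (h : cs.drop n = '(' :: (ds1 ++ 'x' :: ds2 ++ ')' :: tail))
    (h1 : ∀ c ∈ ds1, c.isDigit = true) (h2 : ∀ c ∈ ds2, c.isDigit = true)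
    {fuel : Nat} (hf : ds1.length + ds2.length + 3 ≤ fuel) :
    readMarkerAux cs fuel (↑n) [] 0
      = some ((↑(n + ds1.length + ds2.length + 3) : Int), [ds1, ds2]) := by
  have hK : fuel = (((fuel - (ds1.length + ds2.length + 3)) + ds2.length + 2) + ds1.length) + 1 := by
    omega
  set K := fuel - (ds1.length + ds2.length + 3) with hKdef
  have hshape : cs.drop n = '(' :: (ds1 ++ 'x' :: (ds2 ++ ')' :: tail)) := by
    rw [h]; simp
  have hd1 : cs.drop (n + 1) = ds1 ++ ('x' :: (ds2 ++ ')' :: tail)) := drop_succ_of hshape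
  have hd2 : cs.drop (n + 1 + ds1.length) = 'x' :: (ds2 ++ ')' :: tail) := drop_add_of hd1
  have hd3 : cs.drop (n + 1 + ds1.length + 1) = ds2 ++ ')' :: tail := drop_succ_of hd2
  have hd4 : cs.drop (n + 1 + ds1.length + 1 + ds2.length) = ')' :: tail := drop_add_of hd3
  rw [hK]
  -- step '('
  rw [readMarkerAux, PySem.List.pyGet?_natCast, getElem?_of_drop hshape]
  simp only [Char.reduceEq, reduceIte]
  rw [show (↑n : Int) + 1 = ↑(n + 1) from by push_cast; ring]
  -- scan ds1
  have s1 := rmScan cs h1 (K + ds2.length + 2) (n + 1) ('x' :: (ds2 ++ ')' :: tail)) [] [] hd1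
  simp only [List.nil_append, List.length_nil] at s1 ⊢
  rw [s1]
  -- step 'x'
  rw [readMarkerAux, PySem.List.pyGet?_natCast, getElem?_of_drop hd2]
  simp only [Char.reduceEq, reduceIte]
  rw [show (↑(n + 1 + ds1.length) : Int) + 1 = ↑(n + 1 + ds1.length + 1) from by push_cast; ring]
  rw [show K + ds2.length + 1 = (K + 1) + ds2.length from by omega]
  -- scan ds2
  have s2 := rmScan cs h2 (K + 1) (n + 1 + ds1.length + 1) (')' :: tail) [ds1] [] hd3
  simp only [List.nil_append, List.length_cons, List.length_nil] at s2 ⊢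
  rw [show ([ds1] : List (List Char)) ++ [[]] = [ds1, []] from rfl]
  rw [show (0 : Nat) + 1 = 1 from rfl] at s2 ⊢
  simp only [List.cons_append, List.nil_append] at s2
  rw [s2]
  -- step ')'
  rw [readMarkerAux, PySem.List.pyGet?_natCast, getElem?_of_drop hd4]
  simp only [Char.reduceEq, reduceIte]
  congr 2
  push_cast
  ring

lemma loopA (cs : List Char) :
    ∀ (fuel n : Nat) (out : List Char), pvGood (cs.drop n) = true → cs.length - n < fuel →
      parseLoopA cs fuel (↑n) out = some (out ++ decomp (cs.drop n)) := by
  intro fuel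
  induction fuel with
  | zero => intro n out _ h; omega
  | succ fuel ih =>
    intro n out hg hlt
    by_cases hn : n < cs.length
    · rw [parseLoopA, if_pos (by exact_mod_cast hn)]
      have hcons : cs.drop n = cs[n] :: cs.drop (n + 1) := List.drop_eq_getElem_cons hn
      rw [PySem.List.pyGet?_natCast, getElem?_of_drop hcons]
      simp only []
      by_cases hc : cs[n] = '('
      · rw [if_pos hc]
        rw [hcons, hc] at hg
        obtain ⟨ds1, ds2, tail, v1, v2, hrest, hdig1, hdig2, hv1, hv2, hnn1, hnn2, hrec⟩ :=
          pvGood_paren hg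
        have hdropfull : cs.drop n = '(' :: (ds1 ++ 'x' :: ds2 ++ ')' :: tail) := by
          rw [hcons, hc, hrest]
        have hlenb : ds1.length + ds2.length + 3 ≤ cs.length + 1 := by
          have := congrArg List.length hdropfull
          simp [List.length_drop] at this
          omega
        rw [rmMarker cs hdropfull hdig1 hdig2 hlenb]
        simp only []
        have hmap : List.mapM PySem.Int.ofChars? [ds1, ds2] = some [v1, v2] := by
          simp [hv1, hv2]
        rw [hmap]
        simp only []
        -- the marker data
        have hdroptail : cs.drop (n + ds1.length + ds2.length + 3) = tail := by
          have hsh : cs.drop n = ('(' :: (ds1 ++ 'x' :: ds2 ++ [')'])) ++ tail := by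
            rw [hdropfull]; simp
          have h' := drop_add_of hsh
          rw [show n + ds1.length + ds2.length + 3
              = n + ('(' :: (ds1 ++ 'x' :: ds2 ++ [')'])).length from by simp; omega]
          exact h'
        have hv1cast : v1 = ((v1.toNat : Nat) : Int) := (Int.toNat_of_nonneg hnn1).symm
        rw [hv1cast]
        rw [show ((↑(n + ds1.length + ds2.length + 3) : Int) + ↑v1.toNat)
            = ↑(n + ds1.length + ds2.length + 3 + v1.toNat) from by push_cast; ring]
        rw [show PySem.List.slice cs (some ↑(n + ds1.length + ds2.length + 3))
              (some ↑(n + ds1.length + ds2.length + 3 + v1.toNat))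
            = (cs.drop (n + ds1.length + ds2.length + 3)).take v1.toNat from by
          rw [← PySem.List.slice_natCast_add]; push_cast; ring_nf]
        rw [hdroptail]
        have hgood' : pvGood (cs.drop (n + ds1.length + ds2.length + 3 + v1.toNat)) = true := by
          have : cs.drop (n + ds1.length + ds2.length + 3 + v1.toNat)
              = (cs.drop (n + ds1.length + ds2.length + 3)).drop v1.toNat := by
            rw [List.drop_drop]; try ring_nf
          rw [this, hdroptail]; exact hrec
        rw [ih (n + ds1.length + ds2.length + 3 + v1.toNat) _ hgood' (by omega)]
        have hdrop2 : cs.drop (n + ds1.length + ds2.length + 3 + v1.toNat)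
            = tail.drop v1.toNat := by
          have : cs.drop (n + ds1.length + ds2.length + 3 + v1.toNat)
              = (cs.drop (n + ds1.length + ds2.length + 3)).drop v1.toNat := by
            rw [List.drop_drop]; try ring_nf
          rw [this, hdroptail]
        rw [hdrop2, hdropfull, decomp_paren hdig1 hdig2 hv1 hv2]
        simp
      · rw [if_neg hc]
        rw [hcons, pvGood] at hg
        simp only [if_neg hc] at hg
        rw [show (↑n : Int) + 1 = ↑(n + 1) from by push_cast; ring]
        rw [ih (n + 1) (out ++ [cs[n]]) hg (by omega)]
        rw [hcons, decomp]
        simp only [if_neg hc]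
        simp
    · rw [parseLoopA, if_neg (by push_cast; omega)]
      have h0 : cs.drop n = [] := List.drop_eq_nil_iff.mpr (by omega)
      have hd0 : decomp ([] : List Char) = [] := by rw [decomp]
      rw [h0, hd0]
      simp

-- ===== B-side loop characterisation =====

lemma first_split {c : Char} {s : List Char} (h : c ∈ s) :
    ∃ pre t, s = pre ++ c :: t ∧ c ∉ pre := by
  induction s with
  | nil => simp at h
  | cons a s ih =>
    by_cases ha : a = c
    · exact ⟨[], s, by simp [ha], by simp⟩
    · have hcs : c ∈ s := by
        rcases List.mem_cons.mp h with h' | h'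
        · exact absurd h'.symm ha
        · exact h'
      obtain ⟨pre, t, rfl, hpre⟩ := ih hcs
      refine ⟨a :: pre, t, by simp, ?_⟩
      simp only [List.mem_cons, not_or]
      exact ⟨fun hh => ha hh.symm, hpre⟩

lemma find_singleton_not_mem {c : Char} {s : List Char} (h : c ∉ s) :
    PySem.Chars.find s [c] = -1 := by
  rw [PySem.Chars.find_eq_neg_one_iff, List.singleton_infix_iff]
  exact h

lemma find_singleton_first {c : Char} {pre t : List Char} (h : c ∉ pre) :
    PySem.Chars.find (pre ++ c :: t) [c] = ↑pre.length := by
  set s := pre ++ c :: t with hs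
  have hmem : c ∈ s := by simp [hs]
  have hnn : 0 ≤ PySem.Chars.find s [c] := by
    rw [PySem.Chars.find_nonneg_iff, List.singleton_infix_iff]; exact hmem
  obtain ⟨hpref, hmin⟩ := PySem.Chars.find_spec hnn
  set f := (PySem.Chars.find s [c]).toNat with hf
  have hsf : s[f]? = some c := by
    obtain ⟨u, hu⟩ := hpref
    have h0 : (s.drop f)[0]? = some c := by rw [← hu]; rfl
    have hg : (s.drop f)[0]? = s[f + 0]? := List.getElem?_drop
    rw [hg] at h0; simpa using h0
  have hflen : f < s.length := by
    by_contra hge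
    rw [List.getElem?_eq_none_iff.mpr (by omega)] at hsf
    simp at hsf
  have hfeq : f = pre.length := by
    rcases Nat.lt_trichotomy f pre.length with hlt | heq | hgt
    · exfalso
      have hg : s[f]? = pre[f]? := by rw [hs]; exact List.getElem?_append_left hlt
      rw [hg] at hsf
      exact h (List.mem_of_getElem? hsf)
    · exact heq
    · exfalso
      apply hmin pre.length hgt
      refine ⟨t, ?_⟩
      rw [hs, List.drop_left]
      rfl
  rw [hf] at hfeq
  omega

lemma go_scan {pre : List Char} (h : 'x' ∉ pre) :
    ∀ (fuel : Nat) (l cur : List Char) (acc : List (List Char)),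
      PySem.Chars.splitOn.go ['x'] (fuel + pre.length) (pre ++ l) cur acc
        = PySem.Chars.splitOn.go ['x'] fuel l (pre.reverse ++ cur) acc := by
  induction pre with
  | nil => intro fuel l cur acc; simp
  | cons d pre ih =>
    intro fuel l cur acc
    have hd : ¬(d = 'x') := by rintro rfl; exact h (by simp)
    have h' : 'x' ∉ pre := fun hh => h (by simp [hh])
    have : fuel + (d :: pre).length = (fuel + pre.length) + 1 := by simp; omega
    rw [this]
    rw [PySem.Chars.splitOn.go.eq_def]
    simp only [List.cons_append]
    rw [if_neg (by simp [List.isPrefixOf]; exact fun hh => hd hh.symm)]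
    rw [ih h' fuel l (d :: cur) acc]
    simp

lemma go_stop (fuel : Nat) (cur : List Char) (acc : List (List Char)) :
    PySem.Chars.splitOn.go ['x'] fuel [] cur acc = (cur.reverse :: acc).reverse := by
  cases fuel with
  | zero => rw [PySem.Chars.splitOn.go.eq_def]; simp
  | succ f => rw [PySem.Chars.splitOn.go.eq_def]

lemma splitOn_two {ds1 ds2 : List Char} (h1 : 'x' ∉ ds1) (h2 : 'x' ∉ ds2) :
    PySem.Chars.splitOn (ds1 ++ 'x' :: ds2) ['x'] = [ds1, ds2] := by
  unfold PySem.Chars.splitOn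
  have hlen : (ds1 ++ 'x' :: ds2).length + 1 = (ds2.length + 2) + ds1.length := by simp; omega
  rw [hlen, go_scan h1]
  rw [show ds2.length + 2 = (ds2.length + 1) + 1 by omega]
  rw [PySem.Chars.splitOn.go.eq_def]
  simp only [List.cons_append]
  rw [if_pos (by simp [List.isPrefixOf])]
  have : List.drop (['x'].length) ('x' :: ds2) = ds2 := by simp
  rw [this]
  have hgs := go_scan h2 1 [] [] [((ds1.reverse ++ ([] : List Char)).reverse : List Char)]
  simp only [List.append_nil] at hgs ⊢
  rw [show ds2.length + 1 = 1 + ds2.length by omega]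
  rw [hgs, go_stop]
  simp


lemma join_nil_eq_flatten (ps : List (List Char)) : PySem.Chars.join [] ps = ps.flatten := by
  induction ps with
  | nil => simp [PySem.Chars.join_nil]
  | cons p ps ih =>
    cases ps with
    | nil => simp [PySem.Chars.join_singleton]
    | cons q rest => simp [PySem.Chars.join_cons_cons, ih]

lemma loopB (cs : List Char) :
    ∀ (fuel n : Nat) (acc : List (List Char)), pvGood (cs.drop n) = true → cs.length - n < fuel →
      ∃ ps, parseLoopB cs fuel (↑n) acc = some ps ∧
        ps.flatten = acc.flatten ++ decomp (cs.drop n) := by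
  intro fuel
  induction fuel with
  | zero => intro n acc _ h; omega
  | succ fuel ih =>
    intro n acc hg hlt
    by_cases hn : n < cs.length
    · rw [parseLoopB, if_pos (by exact_mod_cast hn)]
      simp only [PySem.Chars.findFrom_natCast cs _ n (Nat.le_of_lt hn)]
      by_cases hmem : '(' ∈ cs.drop n
      · obtain ⟨pre, t, hsplit, hpre⟩ := first_split hmem
        rw [hsplit, find_singleton_first hpre]
        rw [if_neg (show ¬((↑pre.length : Int) = -1) from by omega)]
        rw [if_neg (show ¬((↑n : Int) + ↑pre.length = -1) from by omega)]
        -- position of the '('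
        have hdropj : cs.drop (n + pre.length) = '(' :: t := drop_add_of hsplit
        have hjlen : n + pre.length < cs.length := by
          have := congrArg List.length hdropj
          simp [List.length_drop] at this
          omega
        have hgt : pvGood ('(' :: t) = true := by
          rw [hsplit] at hg
          rw [← (noparen_append hpre ('(' :: t)).1]
          exact hg
        obtain ⟨ds1, ds2, tail, v1, v2, hrest, hdig1, hdig2, hv1, hv2, hnn1, hnn2, hrec⟩ :=
          pvGood_paren hgt
        -- the closing ')'
        have hdropj' : cs.drop (n + pre.length)
            = ('(' :: ds1 ++ 'x' :: ds2) ++ ')' :: tail := by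
          rw [hdropj, hrest]; simp
        have hnp : ')' ∉ ('(' :: ds1 ++ 'x' :: ds2) := by
          intro hmem'
          rcases List.mem_cons.mp hmem' with h' | h'
          · exact absurd h'.symm (by decide)
          · rcases List.mem_append.mp h' with h'' | h''
            · exact absurd rfl (digit_ne (hdig1 _ h'')).2.1
            · rcases List.mem_cons.mp h'' with h3 | h3
              · exact absurd h3.symm (by decide)
              · exact absurd rfl (digit_ne (hdig2 _ h3)).2.1
        rw [show (↑n : Int) + ↑pre.length = ↑(n + pre.length) from by push_cast; ring]
        rw [PySem.Chars.findFrom_natCast cs [')'] (n + pre.length) (Nat.le_of_lt hjlen)]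
        rw [hdropj', find_singleton_first hnp]
        rw [if_neg (show ¬((↑(('(' :: ds1 ++ 'x' :: ds2).length) : Int) = -1) from by
          have : (0 : Int) ≤ (↑(('(' :: ds1 ++ 'x' :: ds2).length) : Int) := by positivity
          omega)]
        rw [if_neg (show ¬((↑(n + pre.length) : Int) + ↑(('(' :: ds1 ++ 'x' :: ds2).length) = -1)
          from by
          have : (0 : Int) ≤ (↑(('(' :: ds1 ++ 'x' :: ds2).length) : Int) := by positivity
          omega)]
        rw [show (↑(n + pre.length) : Int) + ↑(('(' :: ds1 ++ 'x' :: ds2).length)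
            = ↑(n + pre.length + ds1.length + ds2.length + 2) from by push_cast; simp; ring]
        -- the marker body and its split
        rw [show (↑(n + pre.length) : Int) + 1 = ↑(n + pre.length + 1) from by push_cast; ring]
        rw [PySem.List.slice_natCast]
        have hdropbody : cs.drop (n + pre.length + 1) = t := drop_succ_of hdropj
        rw [show n + pre.length + ds1.length + ds2.length + 2 - (n + pre.length + 1)
            = (ds1 ++ 'x' :: ds2).length from by simp; omega]
        rw [hdropbody, hrest]
        rw [show ds1 ++ 'x' :: ds2 ++ ')' :: tail = (ds1 ++ 'x' :: ds2) ++ ')' :: tail from by simp]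
        rw [List.take_left]
        rw [splitOn_two (fun hx => absurd rfl (digit_ne (hdig1 _ hx)).2.2)
            (fun hx => absurd rfl (digit_ne (hdig2 _ hx)).2.2)]
        have hmap : List.mapM PySem.Int.ofChars? [ds1, ds2] = some [v1, v2] := by
          simp [hv1, hv2]
        rw [hmap]
        simp only []
        -- the repeated chunk
        have hv1cast : v1 = ((v1.toNat : Nat) : Int) := (Int.toNat_of_nonneg hnn1).symm
        rw [hv1cast]
        have hdroptail : cs.drop (n + pre.length + ds1.length + ds2.length + 3) = tail := by
          have hsh : cs.drop (n + pre.length)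
              = ('(' :: (ds1 ++ 'x' :: ds2 ++ [')'])) ++ tail := by
            rw [hdropj, hrest]; simp
          have h' := drop_add_of hsh
          rw [show n + pre.length + ds1.length + ds2.length + 3
              = n + pre.length + ('(' :: (ds1 ++ 'x' :: ds2 ++ [')'])).length from by simp; omega]
          exact h'
        rw [show (↑(n + pre.length + ds1.length + ds2.length + 2) : Int) + 1 + ↑v1.toNat
            = ↑(n + pre.length + ds1.length + ds2.length + 3 + v1.toNat) from by push_cast; ring]
        rw [show (↑(n + pre.length + ds1.length + ds2.length + 2) : Int) + 1
            = ↑(n + pre.length + ds1.length + ds2.length + 3) from by push_cast; ring]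
        rw [show PySem.List.slice cs (some ↑(n + pre.length + ds1.length + ds2.length + 3))
              (some ↑(n + pre.length + ds1.length + ds2.length + 3 + v1.toNat))
            = (cs.drop (n + pre.length + ds1.length + ds2.length + 3)).take v1.toNat from by
          rw [← PySem.List.slice_natCast_add]; push_cast; ring_nf]
        rw [hdroptail]
        -- the recursive call
        have hgood' : pvGood (cs.drop (n + pre.length + ds1.length + ds2.length + 3 + v1.toNat))
            = true := by
          have : cs.drop (n + pre.length + ds1.length + ds2.length + 3 + v1.toNat)
              = (cs.drop (n + pre.length + ds1.length + ds2.length + 3)).drop v1.toNat := by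
            rw [List.drop_drop]; try ring_nf
          rw [this, hdroptail]; exact hrec
        obtain ⟨ps, hps, hflat⟩ := ih (n + pre.length + ds1.length + ds2.length + 3 + v1.toNat)
          (acc ++ [PySem.List.slice cs (some ↑n) (some ↑(n + pre.length))]
            ++ [pyStrMul (List.take v1.toNat tail) v2]) hgood' (by omega)
        refine ⟨ps, hps, ?_⟩
        rw [hflat]
        have hdrop2 : cs.drop (n + pre.length + ds1.length + ds2.length + 3 + v1.toNat)
            = tail.drop v1.toNat := by
          have : cs.drop (n + pre.length + ds1.length + ds2.length + 3 + v1.toNat)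
              = (cs.drop (n + pre.length + ds1.length + ds2.length + 3)).drop v1.toNat := by
            rw [List.drop_drop]; try ring_nf
          rw [this, hdroptail]
        have hslicepre : PySem.List.slice cs (some ↑n) (some ↑(n + pre.length)) = pre := by
          rw [PySem.List.slice_natCast]
          rw [show n + pre.length - n = pre.length from by omega]
          rw [hsplit, List.take_left]
        rw [hdrop2, hslicepre]
        rw [(noparen_append hpre ('(' :: (ds1 ++ 'x' :: ds2 ++ ')' :: tail))).2]
        rw [decomp_paren hdig1 hdig2 hv1 hv2]
        simp
      · rw [find_singleton_not_mem hmem]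
        rw [if_pos rfl, if_pos rfl]
        refine ⟨acc ++ [PySem.List.slice cs (some ↑n) none], rfl, ?_⟩
        rw [PySem.List.slice_from_natCast, decomp_noparen hmem]
        simp
    · rw [parseLoopB, if_neg (by push_cast; omega)]
      have h0 : cs.drop n = [] := List.drop_eq_nil_iff.mpr (by omega)
      have hd0 : decomp ([] : List Char) = [] := by rw [decomp]
      refine ⟨acc, rfl, ?_⟩
      rw [h0, hd0]
      simp

-- ===== VERDICT (by name: the statement is the Claim_ definition above) =====
theorem parse_spec : Claim_equal_parse := by
  intro l _ hpre
  unfold Spec_parse parse parse_alt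
  have hg : pvGood l.toList = true := by
    rw [← pvGoodF_eq (l.toList.length + 1) l.toList (by omega)]
    exact hpre
  have hA := loopA l.toList (l.toList.length + 1) 0 [] (by simpa using hg) (by omega)
  obtain ⟨ps, hB, hflat⟩ := loopB l.toList (l.toList.length + 1) 0 [] (by simpa using hg) (by omega)
  simp only [Int.natCast_zero] at hA hB
  rw [hA, hB]
  simp [join_nil_eq_flatten, hflat]
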